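-- pv_equiv track=rewrite | github.com/jhaco/SMFile_Writer | smfile_writer.py | compress_measure
-- ===== SOURCE A (Python) =====
-- def compress_measure(measure, note_positions):
--     nth_power = 0
--
--     # tries to fit 128, 64, 32, 16, 8 or 4 note measures; skips 256, since that is already true
--     for power in range(1, 7):
--         can_compress = True
--         for p in note_positions:
--             if int(p%(2**power)) != 0:
--                 can_compress = False
--                 break
--         if can_compress:
--             nth_power = power
--         else:
--             break
--
--     # if fitting fails, returns measure unchanged
--     if nth_power == 0:
--         return measure
--
--     # place notes in compressed measure
--     compressed_measure = ['0000']*int(256/(2**nth_power))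
--     for p in note_positions:
--         new_p = int(p/(2**nth_power))-1
--         compressed_measure[new_p] = measure[p-1]
--
--     return compressed_measure
-- ===== SOURCE B (Python) =====
-- def compress_measure(measure, note_positions):
--     # single pass: running minimum of the 2-adic valuation (clamped at 6) of the positions
--     best = 6
--     for p in note_positions:
--         v = 0
--         q = p
--         while v < best and q % 2 == 0:
--             q //= 2
--             v += 1
--         best = v
--         if best == 0:
--             return measure
--     step = 2 ** best
--     placed = {p // step - 1: measure[p - 1] for p in note_positions}
--     return ['0000' if i not in placed else placed[i] for i in range(256 // step)]
-- ===== Notes on version B (the rewrite author's own statement) =====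
-- stated objective: alternative
-- what changed: Phase 1's six restarting divisibility scans over the position list are replaced by a single pass maintaining the running minimum 2-adic valuation (clamped at 6, early exit on an odd position), and phase 2's preallocated-array assignment loop is replaced by building a position->note dict once and emitting the compressed list with a comprehension over its range.
-- outside the precondition, e.g. on compress_measure([''], [0]): A returns ['0000', '0000', '0000', ''], B returns ['0000', '0000', '0000', '0000']
import Mathlib
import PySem

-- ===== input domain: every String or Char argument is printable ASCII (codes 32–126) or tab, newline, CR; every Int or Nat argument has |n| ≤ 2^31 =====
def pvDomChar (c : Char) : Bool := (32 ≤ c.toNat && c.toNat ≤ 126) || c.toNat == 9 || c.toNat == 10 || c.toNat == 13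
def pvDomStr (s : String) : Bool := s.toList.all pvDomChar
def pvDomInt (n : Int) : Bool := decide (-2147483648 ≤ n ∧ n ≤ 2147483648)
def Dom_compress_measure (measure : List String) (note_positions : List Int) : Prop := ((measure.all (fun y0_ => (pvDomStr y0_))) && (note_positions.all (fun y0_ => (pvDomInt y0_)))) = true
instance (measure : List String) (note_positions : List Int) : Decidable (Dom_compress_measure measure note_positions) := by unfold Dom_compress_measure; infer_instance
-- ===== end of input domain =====

-- B replaces A's six restarting divisibility scans by one running-minimum-valuation pass and
-- the array-assignment placement by a dict + range comprehension (objective: alternative).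

-- ===== PORT A =====
-- inner 'for p in note_positions: …' loop with break, computing can_compress
def aInner (note_positions : List Int) (power : Int) : Bool :=
  match note_positions with
  | [] => true
  | p :: rest => if PySem.Int.mod p (2 ^ power.toNat) ≠ 0 then false else aInner rest power

-- outer 'for power in range(1, 7)' loop with break, accumulator nth_power
def aOuter (note_positions : List Int) (powers : List Int) (nth_power : Int) : Int :=
  match powers with
  | [] => nth_power
  | power :: rest =>
      if aInner note_positions power then aOuter note_positions rest power else nth_power

def compress_measure (measure : List String) (note_positions : List Int) : List String :=
  let nth_power := aOuter note_positions (PySem.List.pyRange 1 7 1) 0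
  if nth_power = 0 then measure
  else
    -- ['0000']*int(256/(2**nth_power)): 256/2**k is an exact float, int() is the identity there
    let init := List.replicate (256 / 2 ^ nth_power.toNat) "0000"
    -- int(p/(2**nth_power)): the loop above guarantees 2**nth_power divides p whenever this
    -- line runs, so the float quotient is an exact integer and int() of it equals floor division
    note_positions.foldl (fun cm p =>
      PySem.List.pySetD cm (PySem.Int.floordiv p (2 ^ nth_power.toNat) - 1)
        (PySem.List.pyGetD measure (p - 1) "")) init

-- ===== PORT B =====
-- 'while v < best and q % 2 == 0' loop: fuel = best - v, returns the final v
def bVal (cap : Nat) (q : Int) : Nat :=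
  match cap with
  | 0 => 0
  | cap' + 1 => if PySem.Int.mod q 2 = 0 then bVal cap' (PySem.Int.floordiv q 2) + 1 else 0

-- 'for p in note_positions' with the early 'return measure' encoded as none
def bLoop (note_positions : List Int) (best : Nat) : Option Nat :=
  match note_positions with
  | [] => some best
  | p :: rest =>
      let v := bVal best p
      if v = 0 then none else bLoop rest v

def compress_measure_alt (measure : List String) (note_positions : List Int) : List String :=
  match bLoop note_positions 6 with
  | none => measure
  | some best =>
    let step : Int := 2 ^ best
    let placed : PySem.Dict Int String := note_positions.foldl
      (fun d p => d.insert (PySem.Int.floordiv p step - 1) (PySem.List.pyGetD measure (p - 1) ""))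
      PySem.Dict.empty
    (PySem.List.pyRange 0 ((256 / 2 ^ best : Nat) : Int) 1).map
      (fun i => if placed.contains i = false then "0000" else placed.getD i "0000")

-- ===== PRECONDITION & SPEC =====
-- Pre_ restricts the compress branch (all positions even) to positions in the natural 1-based range
-- 1..min(256, len(measure)); outside it A raises IndexError or silently wraps negative indexes
-- (positions ≤ 0), which lies outside the function's intended domain of 1-based note positions.
def Pre_compress_measure (measure : List String) (note_positions : List Int) : Prop :=
  (∃ p ∈ note_positions, ¬ (2:Int) ∣ p) ∨
  (∀ p ∈ note_positions, 1 ≤ p ∧ p ≤ 256 ∧ p ≤ (measure.length : Int))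

instance (measure : List String) (note_positions : List Int) : Decidable (Pre_compress_measure measure note_positions) := by
  unfold Pre_compress_measure; infer_instance

def pvWitness_compress_measure : List String × List Int :=
  (["a", "bb", "c", "dd", "e", "ff", "g", "hh"], [2, 4, 8])

def Spec_compress_measure (measure : List String) (note_positions : List Int) (out : List String) : Prop := out = compress_measure_alt measure note_positions
instance (measure : List String) (note_positions : List Int) (out : List String) : Decidable (Spec_compress_measure measure note_positions out) := by unfold Spec_compress_measure; infer_instance

-- ===== CLAIM (what is proved, stated in full; the proofs are below) =====
def Claim_equal_compress_measure : Prop := ∀ (measure : List String) (note_positions : List Int), Dom_compress_measure measure note_positions → Pre_compress_measure measure note_positions → Spec_compress_measure measure note_positions (compress_measure measure note_positions)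

-- ===== LEMMAS AND PROOFS =====

-- bVal cap q = min cap (2-adic valuation of q), characterised by its lower bounds
theorem bVal_iff (cap : Nat) (q : Int) (j : Nat) :
    j ≤ bVal cap q ↔ j ≤ cap ∧ (2:Int) ^ j ∣ q := by
  induction cap generalizing q j with
  | zero =>
      simp only [bVal, Nat.le_zero]
      constructor
      · rintro rfl; exact ⟨rfl, by simp⟩
      · rintro ⟨h, _⟩; exact h
  | succ c ih =>
      simp only [bVal]
      by_cases h : PySem.Int.mod q 2 = 0
      · have hq : (2:Int) ∣ q := (PySem.Int.mod_eq_zero_iff_dvd q 2).mp h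
        obtain ⟨m, rfl⟩ := hq
        have hfd : PySem.Int.floordiv (2 * m) 2 = m := by
          rw [PySem.Int.floordiv_eq_ediv_of_pos (by norm_num)]
          exact Int.mul_ediv_cancel_left m (by norm_num)
        rw [if_pos h, hfd]
        cases j with
        | zero => simp
        | succ j' =>
            rw [show j' + 1 ≤ bVal c m + 1 ↔ j' ≤ bVal c m by omega, ih m j',
              show j' + 1 ≤ c + 1 ↔ j' ≤ c by omega, pow_succ']
            exact and_congr Iff.rfl (mul_dvd_mul_iff_left (by norm_num : (2:Int) ≠ 0)).symm
      · have hq : ¬ (2:Int) ∣ q := fun hd => h ((PySem.Int.mod_eq_zero_iff_dvd q 2).mpr hd)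
        rw [if_neg h]
        simp only [Nat.le_zero]
        constructor
        · rintro rfl; exact ⟨by omega, by simp⟩
        · rintro ⟨_, hdvd⟩
          rcases Nat.eq_zero_or_pos j with rfl | hj
          · rfl
          · exact absurd (dvd_trans (dvd_pow_self 2 (by omega : j ≠ 0)) hdvd) hq

theorem aInner_iff (l : List Int) (power : Int) :
    aInner l power = true ↔ ∀ p ∈ l, (2:Int) ^ power.toNat ∣ p := by
  induction l with
  | nil => simp [aInner]
  | cons p rest ih =>
      simp only [aInner, List.mem_cons, forall_eq_or_imp]
      by_cases h : PySem.Int.mod p (2 ^ power.toNat) = 0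
      · have hdvd : (2:Int) ^ power.toNat ∣ p := (PySem.Int.mod_eq_zero_iff_dvd _ _).mp h
        rw [if_neg (not_not_intro h), ih]
        simp [hdvd]
      · have hnd : ¬ (2:Int) ^ power.toNat ∣ p :=
          fun hdvd => h ((PySem.Int.mod_eq_zero_iff_dvd _ _).mpr hdvd)
        rw [if_pos h]
        simp [hnd]

-- bLoop characterisation: none ↔ some position is odd; some b pins b by its lower bounds
theorem bLoop_char : ∀ (l : List Int) (cap : Nat), 1 ≤ cap →
    (bLoop l cap = none ↔ ∃ p ∈ l, ¬ (2:Int) ∣ p) ∧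
    (∀ b, bLoop l cap = some b →
      ∀ j : Nat, j ≤ b ↔ (j ≤ cap ∧ ∀ p ∈ l, (2:Int) ^ j ∣ p)) := by
  intro l
  induction l with
  | nil =>
      intro cap _
      constructor
      · simp [bLoop]
      · intro b hb j
        simp only [bLoop, Option.some.injEq] at hb
        subst hb
        simp
  | cons p rest ih =>
      intro cap hcap
      by_cases hv : bVal cap p = 0
      · have hodd : ¬ (2:Int) ∣ p := by
          intro hdvd
          have h1 : 1 ≤ bVal cap p :=
            (bVal_iff cap p 1).mpr ⟨hcap, by simpa [pow_one] using hdvd⟩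
          omega
        constructor
        · simp only [bLoop]
          rw [if_pos hv]
          exact iff_of_true rfl ⟨p, by simp, hodd⟩
        · intro b hb
          simp [bLoop, hv] at hb
      · have hv1 : 1 ≤ bVal cap p := by omega
        have h2p : (2:Int) ∣ p := by
          have h := (bVal_iff cap p 1).mp hv1
          simpa [pow_one] using h.2
        obtain ⟨ihn, ihs⟩ := ih (bVal cap p) hv1
        constructor
        · simp only [bLoop, hv, if_false]
          rw [ihn]
          constructor
          · rintro ⟨x, hx, ho⟩; exact ⟨x, List.mem_cons_of_mem _ hx, ho⟩
          · rintro ⟨x, hx, ho⟩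
            rcases List.mem_cons.mp hx with rfl | hx'
            · exact absurd h2p ho
            · exact ⟨x, hx', ho⟩
        · intro b hb j
          simp only [bLoop, hv, if_false] at hb
          rw [ihs b hb j]
          constructor
          · rintro ⟨hjv, hall⟩
            have hj := (bVal_iff cap p j).mp hjv
            refine ⟨hj.1, fun x hx => ?_⟩
            rcases List.mem_cons.mp hx with rfl | hx'
            · exact hj.2
            · exact hall x hx'
          · rintro ⟨hjc, hall⟩
            exact ⟨(bVal_iff cap p j).mpr ⟨hjc, hall p (by simp)⟩,
              fun x hx => hall x (List.mem_cons_of_mem _ hx)⟩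

-- phase 2: the array-assignment fold agrees pointwise with the dict built by the insert fold
theorem phase2 (b L : Nat) (measure : List String) :
    ∀ (l : List Int) (cm : List String) (d : PySem.Dict Int String),
    (∀ p ∈ l, ∃ m : Int, p = 2 ^ b * m ∧ 1 ≤ m ∧ m ≤ (L : Int)) →
    cm.length = L →
    (∀ i : Nat, i < L →
      cm[i]? = some (if (d.contains (i:Int)) = false then "0000" else d.getD (i:Int) "0000")) →
    (l.foldl (fun cm p => PySem.List.pySetD cm (PySem.Int.floordiv p ((2:Int) ^ b) - 1)
        (PySem.List.pyGetD measure (p - 1) "")) cm).length = L ∧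
    (∀ i : Nat, i < L →
      (l.foldl (fun cm p => PySem.List.pySetD cm (PySem.Int.floordiv p ((2:Int) ^ b) - 1)
        (PySem.List.pyGetD measure (p - 1) "")) cm)[i]? =
      some (if ((l.foldl (fun d p => d.insert (PySem.Int.floordiv p ((2:Int) ^ b) - 1)
              (PySem.List.pyGetD measure (p - 1) "")) d).contains (i:Int)) = false then "0000"
            else (l.foldl (fun d p => d.insert (PySem.Int.floordiv p ((2:Int) ^ b) - 1)
              (PySem.List.pyGetD measure (p - 1) "")) d).getD (i:Int) "0000")) := by
  intro l
  induction l with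
  | nil =>
      intro cm d _ hlen hinv
      exact ⟨hlen, fun i hi => hinv i hi⟩
  | cons p rest ih =>
      intro cm d hmem hlen hinv
      obtain ⟨m, hpm, hm1, hmL⟩ := hmem p (by simp)
      subst hpm
      have hpow : (0:Int) < 2 ^ b := by positivity
      have hfd : PySem.Int.floordiv ((2:Int) ^ b * m) ((2:Int) ^ b) = m := by
        rw [PySem.Int.floordiv_eq_ediv_of_pos hpow]
        exact Int.mul_ediv_cancel_left m (ne_of_gt hpow)
      simp only [List.foldl_cons, hfd]
      rw [PySem.List.pySetD_of_nonneg _ _ (by omega : (0:Int) ≤ m - 1)]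
      apply ih
      · exact fun q hq => hmem q (List.mem_cons_of_mem _ hq)
      · simpa using hlen
      · intro i hi
        rw [List.getElem?_set]
        have hkey : ((i:Int) = m - 1) ↔ ((m - 1).toNat = i) := by omega
        by_cases hc : (m - 1).toNat = i
        · have hci : (i:Int) = m - 1 := hkey.mpr hc
          have hilen : (m - 1).toNat < cm.length := by rw [hlen]; omega
          simp [hc, hci, hlen, hi]
        · have hci : (i:Int) ≠ m - 1 := fun h => hc (hkey.mp h)
          simp only [hc, if_false]
          rw [hinv i hi]
          simp [hci, PySem.Dict.contains_insert, PySem.Dict.getD_insert]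

theorem compress_measure_spec : Claim_equal_compress_measure := by
  intro measure l _hdom hpre
  show compress_measure measure l = compress_measure_alt measure l
  have hrange : PySem.List.pyRange 1 7 1 = [1, 2, 3, 4, 5, 6] := by decide
  have hchar := bLoop_char l 6 (by norm_num)
  cases hbl : bLoop l 6 with
  | none =>
      obtain ⟨p, hp, hodd⟩ := hchar.1.mp hbl
      have hf : aInner l 1 = false := by
        cases hAI : aInner l 1 with
        | false => rfl
        | true =>
            have := (aInner_iff l 1).mp hAI p hp
            exact absurd (by simpa using this) hodd
      simp only [compress_measure, compress_measure_alt, hbl, hrange, aOuter, hf]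
      simp
  | some b =>
      have hchar2 := hchar.2 b hbl
      have hb6 : b ≤ 6 := ((hchar2 b).mp le_rfl).1
      have hall2 : ∀ p ∈ l, (2:Int) ∣ p := by
        intro p hp
        by_contra hodd
        rw [hchar.1.mpr ⟨p, hp, hodd⟩] at hbl
        simp at hbl
      have hb1 : 1 ≤ b := (hchar2 1).mpr ⟨by norm_num, by simpa [pow_one] using hall2⟩
      have hallb : ∀ p ∈ l, (2:Int) ^ b ∣ p := ((hchar2 b).mp le_rfl).2
      have hrng : ∀ p ∈ l, 1 ≤ p ∧ p ≤ 256 ∧ p ≤ (measure.length : Int) := by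
        rcases hpre with h | h
        · obtain ⟨p, hp, ho⟩ := h
          exact absurd (hall2 p hp) ho
        · exact h
      -- A's nth_power equals b
      have haInner : ∀ k : Int, 1 ≤ k → k ≤ 6 → (aInner l k = true ↔ k.toNat ≤ b) := by
        intro k hk1 hk6
        rw [aInner_iff, hchar2 k.toNat]
        simp [show k.toNat ≤ 6 by omega]
      have hA : aOuter l (PySem.List.pyRange 1 7 1) 0 = (b : Int) := by
        have g : ∀ k : Int, 1 ≤ k → k ≤ 6 → aInner l k = decide (k.toNat ≤ b) := by
          intro k hk1 hk6
          by_cases hk : k.toNat ≤ b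
          · simp [hk, (haInner k hk1 hk6).mpr hk]
          · cases hAI : aInner l k with
            | false => simp [hk]
            | true => exact absurd ((haInner k hk1 hk6).mp hAI) hk
        rw [hrange]
        simp only [aOuter, g 1 (by norm_num) (by norm_num), g 2 (by norm_num) (by norm_num),
          g 3 (by norm_num) (by norm_num), g 4 (by norm_num) (by norm_num),
          g 5 (by norm_num) (by norm_num), g 6 (by norm_num) (by norm_num)]
        interval_cases b <;> simp
      have hLmul : ((256 / 2 ^ b : Nat) : Int) * 2 ^ b = 256 := by
        interval_cases b <;> norm_num
      have hvals : ∀ p ∈ l, ∃ m : Int, p = 2 ^ b * m ∧ 1 ≤ m ∧ m ≤ ((256 / 2 ^ b : Nat) : Int) := by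
        intro p hp
        obtain ⟨m, hm⟩ := hallb p hp
        have hpow : (0:Int) < 2 ^ b := by positivity
        have h1 := (hrng p hp).1
        have h2 := (hrng p hp).2.1
        rw [hm] at h1 h2
        refine ⟨m, hm, by nlinarith, by nlinarith [hLmul]⟩
      obtain ⟨hlenF, hptF⟩ := phase2 b (256 / 2 ^ b) measure l
        (List.replicate (256 / 2 ^ b) "0000") PySem.Dict.empty hvals (by simp)
        (by
          intro i hi
          simp [hi])
      simp only [compress_measure, compress_measure_alt, hbl, hA]
      rw [if_neg (by exact_mod_cast Nat.one_le_iff_ne_zero.mp hb1)]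
      simp only [Int.toNat_natCast]
      apply List.ext_getElem?
      intro i
      by_cases hi : i < 256 / 2 ^ b
      · rw [hptF i hi, PySem.List.getElem?_map_pyRange_zero _ _ _ hi]
      · rw [List.getElem?_eq_none (by rw [hlenF]; omega),
          List.getElem?_eq_none (by rw [List.length_map, PySem.List.length_pyRange_one]; omega)]
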